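-- pv_equiv track=rewrite | github.com/MeguruForever/My_homework | homework40-60/E057_2227406044.py | getGradOfStudents
-- ===== SOURCE A (Python) =====
-- def getGradOfStudents(lst):
--     '''
--     function: 根据学生成绩列表lst，统计优秀人数、通过人数和不及格人数
--     para: lst---学生成绩列表
--     return: [优秀人数，通过人数，不及格人数]
--     '''
--     youxiu=0
--     tongguo=0
--     bujige=0
--     for i in lst:
--         if i >=90:
--             youxiu+=1
--         elif i<90 and i>=60:
--             tongguo+=1
--         else:
--             bujige+=1
--     return [youxiu,tongguo,bujige]
-- ===== SOURCE B (Python) =====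
-- def getGradOfStudents(lst):
--     youxiu = sum(1 for i in lst if i >= 90)
--     tongguo = sum(1 for i in lst if 60 <= i < 90)
--     bujige = len(lst) - youxiu - tongguo
--     return [youxiu, tongguo, bujige]
-- ===== Notes on version B (the rewrite author's own statement) =====
-- stated objective: idiomatic
-- what changed: Replaced the single triple-accumulator loop with two independent filtered counts (sum of generator expressions) and derives the failing count from the list length, returning the three counts directly.
import Mathlib
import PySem

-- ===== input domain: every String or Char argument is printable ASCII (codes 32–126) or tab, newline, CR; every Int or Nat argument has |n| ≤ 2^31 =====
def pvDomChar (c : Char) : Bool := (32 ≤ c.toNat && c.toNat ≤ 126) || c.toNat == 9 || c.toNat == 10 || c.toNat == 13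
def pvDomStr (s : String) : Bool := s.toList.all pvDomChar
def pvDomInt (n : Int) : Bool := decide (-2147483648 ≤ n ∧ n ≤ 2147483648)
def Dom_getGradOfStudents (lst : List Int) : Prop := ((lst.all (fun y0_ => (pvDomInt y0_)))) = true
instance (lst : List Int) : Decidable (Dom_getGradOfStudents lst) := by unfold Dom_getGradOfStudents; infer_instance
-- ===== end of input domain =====

-- B replaces A's single three-accumulator loop by independent filtered counts plus a
-- length subtraction for the failing count (idiomatic; same O(n) cost).

-- ===== PORT A =====
-- literal port of A's single loop carrying (youxiu, tongguo, bujige)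
def getGradOfStudents (lst : List Int) : List Int :=
  let s := lst.foldl (fun (acc : Int × Int × Int) i =>
    if i ≥ 90 then (acc.1 + 1, acc.2.1, acc.2.2)
    else if i < 90 ∧ i ≥ 60 then (acc.1, acc.2.1 + 1, acc.2.2)
    else (acc.1, acc.2.1, acc.2.2 + 1)) (0, 0, 0)
  [s.1, s.2.1, s.2.2]

-- ===== PORT B =====
-- port of Source B: two filtered counts (sum over a generator ≙ sum of mapped ones), then length subtraction
def getGradOfStudents_alt (lst : List Int) : List Int :=
  let youxiu : Int := ((lst.filter (fun i => i ≥ 90)).map (fun _ => (1 : Int))).sum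
  let tongguo : Int := ((lst.filter (fun i => 60 ≤ i ∧ i < 90)).map (fun _ => (1 : Int))).sum
  let bujige : Int := (lst.length : Int) - youxiu - tongguo
  [youxiu, tongguo, bujige]

-- ===== PRECONDITION & SPEC =====
def Spec_getGradOfStudents (lst : List Int) (out : List Int) : Prop := out = getGradOfStudents_alt lst
instance (lst : List Int) (out : List Int) : Decidable (Spec_getGradOfStudents lst out) := by unfold Spec_getGradOfStudents; infer_instance

-- ===== CLAIM (what is proved, stated in full; the proofs are below) =====
def Claim_equal_getGradOfStudents : Prop := ∀ (lst : List Int), Dom_getGradOfStudents lst → Spec_getGradOfStudents lst (getGradOfStudents lst)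

-- ===== LEMMAS AND PROOFS =====

-- canonical triple of category counts, used only by the proofs to relate the two ports
def pvCnt : List Int → Int × Int × Int
  | [] => (0, 0, 0)
  | i :: t =>
    let s := pvCnt t
    if i ≥ 90 then (s.1 + 1, s.2.1, s.2.2)
    else if i < 90 ∧ i ≥ 60 then (s.1, s.2.1 + 1, s.2.2)
    else (s.1, s.2.1, s.2.2 + 1)

-- A's fold from any accumulator adds the canonical counts
theorem pv_fold_eq (lst : List Int) (a b c : Int) :
    lst.foldl (fun (acc : Int × Int × Int) i =>
      if i ≥ 90 then (acc.1 + 1, acc.2.1, acc.2.2)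
      else if i < 90 ∧ i ≥ 60 then (acc.1, acc.2.1 + 1, acc.2.2)
      else (acc.1, acc.2.1, acc.2.2 + 1)) (a, b, c)
    = (a + (pvCnt lst).1, b + (pvCnt lst).2.1, c + (pvCnt lst).2.2) := by
  induction lst generalizing a b c with
  | nil => simp [pvCnt]
  | cons h t ih =>
    have cnt : pvCnt (h :: t)
      = (if h ≥ 90 then ((pvCnt t).1 + 1, (pvCnt t).2.1, (pvCnt t).2.2)
         else if h < 90 ∧ h ≥ 60 then ((pvCnt t).1, (pvCnt t).2.1 + 1, (pvCnt t).2.2)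
         else ((pvCnt t).1, (pvCnt t).2.1, (pvCnt t).2.2 + 1)) := rfl
    rw [List.foldl_cons, cnt]
    split_ifs with h1 h2 <;> · show List.foldl _ (_, _, _) t = _
                               rw [ih]
                               refine Prod.ext ?_ (Prod.ext ?_ ?_) <;> simp <;> ring

-- B's first count equals the canonical first component
theorem pv_sum_hi (lst : List Int) :
    ((lst.filter (fun i => i ≥ 90)).map (fun _ => (1 : Int))).sum = (pvCnt lst).1 := by
  induction lst with
  | nil => simp [pvCnt]
  | cons h t ih =>
    simp only [List.filter_cons]
    by_cases h1 : h ≥ 90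
    · rw [if_pos (show decide (h ≥ 90) = true by simpa using h1), List.map_cons, List.sum_cons, ih]
      simp only [pvCnt, if_pos h1]
      ring
    · have h2 : pvCnt (h :: t)
        = (if h < 90 ∧ h ≥ 60 then ((pvCnt t).1, (pvCnt t).2.1 + 1, (pvCnt t).2.2)
           else ((pvCnt t).1, (pvCnt t).2.1, (pvCnt t).2.2 + 1)) := by
        simp [pvCnt, h1]
      rw [if_neg (by simpa using h1), h2, ih]
      split_ifs <;> rfl

-- B's second count equals the canonical second component
theorem pv_sum_mid (lst : List Int) :
    ((lst.filter (fun i => 60 ≤ i ∧ i < 90)).map (fun _ => (1 : Int))).sum = (pvCnt lst).2.1 := by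
  induction lst with
  | nil => simp [pvCnt]
  | cons h t ih =>
    simp only [List.filter_cons]
    by_cases h2 : 60 ≤ h ∧ h < 90
    · have h1 : ¬ h ≥ 90 := by omega
      have hcnt : pvCnt (h :: t)
        = ((pvCnt t).1, (pvCnt t).2.1 + 1, (pvCnt t).2.2) := by
        simp [pvCnt, h1, h2.1, h2.2]
      rw [if_pos (by simpa using h2), hcnt, List.map_cons, List.sum_cons, ih]
      ring
    · have hcnt : (pvCnt (h :: t)).2.1 = (pvCnt t).2.1 := by
        by_cases h1 : h ≥ 90
        · simp [pvCnt, h1]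
        · have h2' : ¬ (h < 90 ∧ h ≥ 60) := by omega
          simp [pvCnt, h1, h2']
      rw [if_neg (by simpa using h2), hcnt, ih]

-- the three canonical counts sum to the length
theorem pv_cnt_total (lst : List Int) :
    (pvCnt lst).1 + (pvCnt lst).2.1 + (pvCnt lst).2.2 = (lst.length : Int) := by
  induction lst with
  | nil => simp [pvCnt]
  | cons h t ih =>
    have cnt : pvCnt (h :: t)
      = (if h ≥ 90 then ((pvCnt t).1 + 1, (pvCnt t).2.1, (pvCnt t).2.2)
         else if h < 90 ∧ h ≥ 60 then ((pvCnt t).1, (pvCnt t).2.1 + 1, (pvCnt t).2.2)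
         else ((pvCnt t).1, (pvCnt t).2.1, (pvCnt t).2.2 + 1)) := rfl
    rw [cnt]
    split_ifs <;> simp <;> omega

-- ===== VERDICT (by name: the statement is the Claim_ definition above) =====
theorem getGradOfStudents_spec : Claim_equal_getGradOfStudents := by
  intro lst _
  show _ = _
  simp only [getGradOfStudents, getGradOfStudents_alt, pv_fold_eq, pv_sum_hi, pv_sum_mid]
  have h := pv_cnt_total lst
  simp only [List.cons.injEq, and_true]
  refine ⟨by ring, by ring, by omega⟩
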